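-- pv_equiv track=rewrite | github.com/quentin-auge/hilbertpiet | hilbertpiet/path.py | _stretch_path
-- ===== SOURCE A (Python) =====
-- def _stretch_path(path: str) -> str:
--     """
--     Stretch a path so that `n > 2` consecutive forwards (`F`) become  `5 * n + 2` consecutive
--     forwards.
--     """
--
--     path += '$'
--     i = 0
--     stretched_path = ''
--     n_forward = 0
--     while i < len(path):
--         c = path[i] if path[i] != '$' else ''
--         if c != 'F':
--             forwards = 'F' * (n_forward * 5 + 2) if n_forward != 1 else 'F'
--             stretched_path += forwards + c
--             n_forward = 0
--         else:
--             n_forward += 1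
--         i += 1
--
--     return stretched_path
-- ===== SOURCE B (Python) =====
-- def _stretch_path(path: str) -> str:
--     # Staged pipeline instead of a counter state machine: mask non-F chars to
--     # spaces, split the mask into F-runs, collect the delimiter chars, then
--     # zip runs with delimiters, stretching each run and dropping '$'.
--     s = path + '$'
--     mask = ''.join('F' if c == 'F' else ' ' for c in s)
--     runs = mask.split(' ')
--     delims = [c for c in s if c != 'F']
--     out = []
--     for run, d in zip(runs, delims):
--         n = len(run)
--         out.append('F' if n == 1 else 'F' * (5 * n + 2))
--         if d != '$':
--             out.append(d)
--     return ''.join(out)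
-- ===== Notes on version B (the rewrite author's own statement) =====
-- stated objective: alternative
-- what changed: Replaced the char-by-char while loop with mutable counter state by a staged pipeline: mask non-F chars to spaces, split the mask into F-runs, collect delimiter chars separately, then zip runs with delimiters to emit stretched blocks (dropping '$').
import Mathlib
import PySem

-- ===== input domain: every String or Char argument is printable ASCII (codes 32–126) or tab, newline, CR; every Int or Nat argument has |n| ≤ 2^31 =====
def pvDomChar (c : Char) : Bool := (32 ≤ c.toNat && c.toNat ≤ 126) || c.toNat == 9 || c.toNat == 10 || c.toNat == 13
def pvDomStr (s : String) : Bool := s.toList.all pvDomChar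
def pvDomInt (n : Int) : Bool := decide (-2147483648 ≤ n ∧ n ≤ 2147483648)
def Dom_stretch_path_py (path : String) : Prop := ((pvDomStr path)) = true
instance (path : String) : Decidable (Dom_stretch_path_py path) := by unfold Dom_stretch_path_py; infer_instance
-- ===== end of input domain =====

-- B replaces A's counter state machine by a staged mask/split/filter/zip pipeline (alternative decomposition, same cost class).
-- ===== PORT A =====
-- A's while loop: state = (accumulated output, n_forward counter); c is '' when the char is '$'
def stretchA_go : List Char → List Char → Nat → List Char
  | [], acc, _ => acc
  | ch :: rest, acc, n_forward =>
    let c : List Char := if ch ≠ '$' then [ch] else []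
    if c ≠ ['F'] then
      let forwards : List Char := if n_forward ≠ 1 then List.replicate (n_forward * 5 + 2) 'F' else ['F']
      stretchA_go rest (acc ++ (forwards ++ c)) 0
    else
      stretchA_go rest acc (n_forward + 1)

def stretch_path_py (path : String) : String :=
  String.mk (stretchA_go (path.toList ++ ['$']) [] 0)

-- ===== PORT B =====
-- Source B stage 1: mask = ''.join('F' if c == 'F' else ' ' for c in s)
def stretchB_mask (s : List Char) : List Char :=
  s.map (fun c => if c = 'F' then 'F' else ' ')

-- hand port of Python str.split(' ') (explicit single-char separator, keeps empty parts); exact on all inputs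
def stretchB_split : List Char → List (List Char)
  | [] => [[]]
  | c :: t => if c = ' ' then [] :: stretchB_split t else (stretchB_split t).modifyHead (c :: ·)

-- Source B final loop body: one stretched block per (run, delimiter) pair, dropping '$'
def stretchB_piece (run : List Char) (d : Char) : List Char :=
  (if run.length = 1 then ['F'] else List.replicate (5 * run.length + 2) 'F')
    ++ (if d ≠ '$' then [d] else [])

def stretch_path_py_alt (path : String) : String :=
  let s := path.toList ++ ['$']
  let runs := stretchB_split (stretchB_mask s)
  let delims := s.filter (· ≠ 'F')
  String.mk (List.flatten (List.zipWith stretchB_piece runs delims))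

-- ===== PRECONDITION & SPEC =====
def Spec_stretch_path_py (path : String) (out : String) : Prop := out = stretch_path_py_alt path
instance (path : String) (out : String) : Decidable (Spec_stretch_path_py path out) := by unfold Spec_stretch_path_py; infer_instance

-- ===== CLAIM (what is proved, stated in full; the proofs are below) =====
def Claim_equal_stretch_path_py : Prop := ∀ (path : String), Dom_stretch_path_py path → Spec_stretch_path_py path (stretch_path_py path)

-- ===== LEMMAS AND PROOFS =====
-- B's whole pipeline as one function of the remaining input
def stretchB_core (s : List Char) : List Char :=
  List.flatten (List.zipWith stretchB_piece (stretchB_split (stretchB_mask s)) (s.filter (· ≠ 'F')))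

theorem stretchB_mask_replicate (n : Nat) (s : List Char) :
    stretchB_mask (List.replicate n 'F' ++ s) = List.replicate n 'F' ++ stretchB_mask s := by
  simp [stretchB_mask]

theorem stretchB_split_replicate (n : Nat) (m : List Char) :
    stretchB_split (List.replicate n 'F' ++ m) = (stretchB_split m).modifyHead (List.replicate n 'F' ++ ·) := by
  induction n with
  | zero => cases h : stretchB_split m <;> simp [h]
  | succ k ih =>
    simp only [List.replicate_succ, List.cons_append, stretchB_split]
    rw [if_neg (by decide), ih]
    cases stretchB_split m <;> simp

theorem stretchB_core_step (n : Nat) (c : Char) (rest : List Char) (hc : c ≠ 'F') :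
    stretchB_core (List.replicate n 'F' ++ (c :: rest)) =
      stretchB_piece (List.replicate n 'F') c ++ stretchB_core rest := by
  unfold stretchB_core
  rw [stretchB_mask_replicate]
  have hm : stretchB_mask (c :: rest) = ' ' :: stretchB_mask rest := by
    simp [stretchB_mask, hc]
  rw [hm, stretchB_split_replicate]
  rw [show stretchB_split (' ' :: stretchB_mask rest) = [] :: stretchB_split (stretchB_mask rest) from by
    simp [stretchB_split]]
  simp [hc, List.filter_append]

theorem stretchB_core_forward (n : Nat) (rest : List Char) :
    stretchB_core (List.replicate n 'F' ++ ('F' :: rest)) =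
      stretchB_core (List.replicate (n + 1) 'F' ++ rest) := by
  have : List.replicate n 'F' ++ ('F' :: rest) = List.replicate (n + 1) 'F' ++ rest := by
    simp [List.replicate_succ']
  rw [this]

theorem stretch_go_agree (s : List Char) : ∀ (acc : List Char) (n : Nat),
    stretchA_go s acc n = acc ++ stretchB_core (List.replicate n 'F' ++ s) := by
  induction s with
  | nil =>
    intro acc n
    simp [stretchA_go, stretchB_core]
  | cons c rest ih =>
    intro acc n
    by_cases hF : c = 'F'
    · subst hF
      rw [show stretchA_go ('F' :: rest) acc n = stretchA_go rest acc (n + 1) from by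
        simp [stretchA_go]]
      rw [ih acc (n + 1), stretchB_core_forward]
    · have hcne : (if c ≠ '$' then [c] else []) ≠ ['F'] := by
        by_cases hD : c = '$' <;> simp [hD, hF]
      simp only [stretchA_go, if_pos hcne]
      rw [ih _ 0, stretchB_core_step n c rest hF]
      have hpiece : (if n ≠ 1 then List.replicate (n * 5 + 2) 'F' else ['F'])
            ++ (if c ≠ '$' then [c] else []) = stretchB_piece (List.replicate n 'F') c := by
        unfold stretchB_piece
        by_cases h1 : n = 1 <;> simp [h1, Nat.mul_comm]
      rw [← hpiece]
      simp [List.append_assoc]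

-- ===== VERDICT (by name: the statement is the Claim_ definition above) =====
theorem stretch_path_py_spec : Claim_equal_stretch_path_py := by
  intro path _
  unfold Spec_stretch_path_py stretch_path_py stretch_path_py_alt
  rw [stretch_go_agree (path.toList ++ ['$']) [] 0]
  simp [stretchB_core]
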